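-- pv_equiv track=rewrite | github.com/Pogodowo/cash_specification | to_pdf/sumstr.py | sumpdf
-- ===== SOURCE A (Python) =====
-- def sumpdf(str):
--     s = ''
--     str = str.split()
--     for i in range(0, len(str)):
--         s = s + ' ' + str[i]
--
--         if i > 0 and (i + 1) % 5 == 0:
--             s = s + '\n'
--     return s
-- ===== SOURCE B (Python) =====
-- def sumpdf(str):
--     words = str.split()
--     parts = []
--     while words:
--         chunk, words = words[:5], words[5:]
--         parts.append(' ' + ' '.join(chunk))
--         if len(chunk) == 5:
--             parts.append('\n')
--     return ''.join(parts)
-- ===== Notes on version B (the rewrite author's own statement) =====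
-- stated objective: simpler
-- what changed: B consumes the word list in groups of five (slice off a chunk, join it with spaces, emit a newline after each full chunk) instead of A's per-index loop with a modulo-5 counter and repeated string concatenation.
import Mathlib
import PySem

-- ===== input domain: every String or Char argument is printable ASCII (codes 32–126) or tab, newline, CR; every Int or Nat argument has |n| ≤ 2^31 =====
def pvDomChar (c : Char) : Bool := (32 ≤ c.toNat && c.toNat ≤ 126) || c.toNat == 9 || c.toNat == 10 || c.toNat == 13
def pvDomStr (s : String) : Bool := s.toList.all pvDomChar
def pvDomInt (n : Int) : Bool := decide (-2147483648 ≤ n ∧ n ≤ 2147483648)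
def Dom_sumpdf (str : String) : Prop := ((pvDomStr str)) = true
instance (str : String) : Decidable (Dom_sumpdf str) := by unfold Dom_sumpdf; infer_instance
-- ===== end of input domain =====

-- B replaces A's per-index loop with a modulo-5 branch by a group-of-five traversal
-- (slice off five words, join them, emit the newline per full group); objective: simpler.

-- ===== PORT A =====
-- literal port of A: s = ''; str = str.split(); for i in range(0, len(str)):
--   s = s + ' ' + str[i]; if i > 0 and (i + 1) % 5 == 0: s = s + '\n'
def sumpdf (str : String) : String :=
  let ws := PySem.Str.split₀ str
  (PySem.List.pyRange 0 (ws.length : Int) 1).foldl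
    (fun s i =>
      let s := s ++ " " ++ PySem.List.pyGetD ws i ""
      if 0 < i ∧ PySem.Int.mod (i + 1) 5 = 0 then s ++ "\n" else s)
    ""

-- ===== PORT B =====
-- port of Source B's while loop: chunk, words = words[:5], words[5:];
-- parts.append(' ' + ' '.join(chunk)); if len(chunk) == 5: parts.append('\n')
def sumpdfChunkLoop : List String → List String → List String
  | [], parts => parts
  | w :: t, parts =>
      let chunk := PySem.List.slice (w :: t) none (some 5)
      let rest := PySem.List.slice (w :: t) (some 5) none
      sumpdfChunkLoop rest
        (parts ++ [" " ++ PySem.Str.join " " chunk] ++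
          (if chunk.length = 5 then ["\n"] else []))
  termination_by ws _ => ws.length
  decreasing_by simp [PySem.List.slice_from (w :: t) (by omega : (0:Int) ≤ 5)]

def sumpdf_alt (str : String) : String :=
  PySem.Str.join "" (sumpdfChunkLoop (PySem.Str.split₀ str) [])

-- ===== PRECONDITION & SPEC =====
def Spec_sumpdf (str : String) (out : String) : Prop := out = sumpdf_alt str
instance (str : String) (out : String) : Decidable (Spec_sumpdf str out) := by unfold Spec_sumpdf; infer_instance

-- ===== CLAIM (what is proved, stated in full; the proofs are below) =====
def Claim_equal_sumpdf : Prop := ∀ (str : String), Dom_sumpdf str → Spec_sumpdf str (sumpdf str)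

-- ===== LEMMAS AND PROOFS =====

-- per-index character contribution of A's loop body
def pvGl (ws : List String) (i : Int) : List Char :=
  ' ' :: (PySem.List.pyGetD ws i "").toList ++
    (if 0 < i ∧ PySem.Int.mod (i + 1) 5 = 0 then ['\n'] else [])

-- characters contributed by one chunk of words
def pvChunkChars (chunk : List String) : List Char :=
  chunk.flatMap (fun w => ' ' :: w.toList)

-- common chunked characterization of the output, as characters
def pvSpecChars : List String → List Char
  | [] => []
  | w :: t =>
      pvChunkChars ((w :: t).take 5) ++
      (if 5 ≤ (w :: t).length then ['\n'] else []) ++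
      pvSpecChars ((w :: t).drop 5)
  termination_by ws => ws.length
  decreasing_by simp

theorem pvFoldA_toList (ws : List String) (l : List Int) (s : String) :
    ((l.foldl
      (fun s i =>
        let s := s ++ " " ++ PySem.List.pyGetD ws i ""
        if 0 < i ∧ PySem.Int.mod (i + 1) 5 = 0 then s ++ "\n" else s)
      s).toList) = s.toList ++ l.flatMap (pvGl ws) := by
  induction l generalizing s with
  | nil => simp
  | cons i t ih =>
      simp only [List.foldl_cons, List.flatMap_cons]
      by_cases h : 0 < i ∧ PySem.Int.mod (i + 1) 5 = 0
      · simp only [if_pos h, ih, pvGl, String.toList_append]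
        simp
      · simp only [if_neg h, ih, pvGl, String.toList_append]
        simp

theorem pvMod5_shift (k : Nat) :
    (0 < (5 + (k : Int)) ∧ PySem.Int.mod (5 + (k : Int) + 1) 5 = 0) ↔
    (0 < (k : Int) ∧ PySem.Int.mod ((k : Int) + 1) 5 = 0) := by
  simp only [PySem.Int.mod, Int.fmod_eq_emod]
  omega

theorem pvGl_shift (a b c d e : String) (r : List String) (k : Nat) :
    pvGl (a :: b :: c :: d :: e :: r) (5 + (k : Int)) = pvGl r (k : Int) := by
  have hidx : PySem.List.pyGetD (a :: b :: c :: d :: e :: r) (5 + (k : Int)) "" =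
      PySem.List.pyGetD r (k : Int) "" := by
    have h1 : (5 + (k : Int)) = ((k + 5 : Nat) : Int) := by push_cast; ring
    rw [h1, PySem.List.pyGetD_natCast, PySem.List.pyGetD_natCast,
      show (k + 5 : Nat) = ((((k + 1) + 1) + 1) + 1) + 1 from by omega]
    simp
  simp only [pvGl, hidx, pvMod5_shift k]

theorem pvGl_lit (ws : List String) (k : Nat) :
    pvGl ws (k : Int) =
      ' ' :: (ws.getD k "").toList ++
        (if 0 < k ∧ (k + 1) % 5 = 0 then ['\n'] else []) := by
  have hc : (0 < (k : Int) ∧ PySem.Int.mod ((k : Int) + 1) 5 = 0) ↔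
      (0 < k ∧ (k + 1) % 5 = 0) := by
    simp only [PySem.Int.mod, Int.fmod_eq_emod]
    omega
  simp only [pvGl, PySem.List.pyGetD_natCast, hc]

theorem pvFlatMapA_eq_specChars (ws : List String) :
    (PySem.List.pyRange 0 (ws.length : Int) 1).flatMap (pvGl ws) = pvSpecChars ws := by
  induction ws using pvSpecChars.induct with
  | case1 => simp [pvSpecChars]
  | case2 w t ih =>
      rcases t with _ | ⟨b, _ | ⟨c, _ | ⟨d, _ | ⟨e, r⟩⟩⟩⟩
      · show (PySem.List.pyRange 0 (1:Int) 1).flatMap _ = _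
        rw [show PySem.List.pyRange 0 (1:Int) 1 = [0] from by decide]
        simp [pvSpecChars, pvGl, pvChunkChars, PySem.List.pyGetD_zero_cons]
      · show (PySem.List.pyRange 0 (2:Int) 1).flatMap _ = _
        rw [show PySem.List.pyRange 0 (2:Int) 1 = [0, 1] from by decide]
        simp [pvSpecChars, pvGl, pvChunkChars, PySem.List.pyGetD, PySem.Int.mod,
          PySem.List.pyGet?, PySem.List.pyIdx?]
      · show (PySem.List.pyRange 0 (3:Int) 1).flatMap _ = _
        rw [show PySem.List.pyRange 0 (3:Int) 1 = [0, 1, 2] from by decide]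
        simp [pvSpecChars, pvGl, pvChunkChars, PySem.List.pyGetD, PySem.Int.mod,
          PySem.List.pyGet?, PySem.List.pyIdx?]
      · show (PySem.List.pyRange 0 (4:Int) 1).flatMap _ = _
        rw [show PySem.List.pyRange 0 (4:Int) 1 = [0, 1, 2, 3] from by decide]
        simp [pvSpecChars, pvGl, pvChunkChars, PySem.List.pyGetD, PySem.Int.mod,
          PySem.List.pyGet?, PySem.List.pyIdx?]
      · simp only [List.drop_succ_cons, List.drop_zero] at ih
        have hlen : ((w :: b :: c :: d :: e :: r).length : Int) = 5 + (r.length : Int) := by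
          simp; ring
        rw [hlen, PySem.List.pyRange_one_append 0 5 (5 + (r.length : Int)) (by omega) (by omega),
          List.flatMap_append]
        rw [show PySem.List.pyRange 0 (5:Int) 1 =
          [((0:Nat):Int), ((1:Nat):Int), ((2:Nat):Int), ((3:Nat):Int), ((4:Nat):Int)]
          from by decide]
        have hshift : (PySem.List.pyRange 5 (5 + (r.length : Int)) 1).flatMap
            (pvGl (w :: b :: c :: d :: e :: r)) =
            (PySem.List.pyRange 0 (r.length : Int) 1).flatMap (pvGl r) := by
          rw [PySem.List.pyRange_one 5, PySem.List.pyRange_one 0]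
          simp only [add_sub_cancel_left, sub_zero, List.flatMap_map]
          apply List.flatMap_congr
          intro x _
          simp only [zero_add]
          exact pvGl_shift w b c d e r x
        rw [hshift, ih]
        simp only [List.flatMap_cons, List.flatMap_nil, pvGl_lit]
        simp [pvSpecChars, pvChunkChars, List.getD]

theorem pvJoinEmpty_toList (l : List String) :
    (PySem.Str.join "" l).toList = l.flatMap String.toList := by
  induction l with
  | nil => simp [PySem.Str.join, PySem.Chars.join_nil]
  | cons x t ih =>
      cases t with
      | nil => simp [PySem.Str.join, PySem.Chars.join_singleton]
      | cons y u =>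
          simp only [PySem.Str.join, List.map_cons] at ih ⊢
          rw [PySem.Chars.join_cons_cons]
          simp at ih ⊢
          exact ih

theorem pvChunkStr_toList (chunk : List String) (h : chunk ≠ []) :
    (" " ++ PySem.Str.join " " chunk).toList = pvChunkChars chunk := by
  induction chunk with
  | nil => simp at h
  | cons x t ih =>
      cases t with
      | nil =>
          simp [PySem.Str.join, PySem.Chars.join_singleton, pvChunkChars,
            String.toList_append]
      | cons y u =>
          have ihh := ih (by simp)
          simp only [PySem.Str.join, List.map_cons, String.toList_append] at ihh ⊢
          rw [PySem.Chars.join_cons_cons]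
          simp only [pvChunkChars, List.flatMap_cons] at ihh ⊢
          simp at ihh ⊢
          exact ihh

theorem pvLoopB_toList (ws parts : List String) :
    (PySem.Str.join "" (sumpdfChunkLoop ws parts)).toList =
      parts.flatMap String.toList ++ pvSpecChars ws := by
  induction ws using pvSpecChars.induct generalizing parts with
  | case1 =>
      simp only [sumpdfChunkLoop]
      rw [pvJoinEmpty_toList]
      simp [pvSpecChars]
  | case2 w t ih =>
      rw [sumpdfChunkLoop]
      simp only [PySem.List.slice_to _ (by omega : (0:Int) ≤ 5),
        PySem.List.slice_from _ (by omega : (0:Int) ≤ 5),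
        show (5:Int).toNat = 5 from rfl]
      rw [ih]
      have htake : (w :: t).take 5 ≠ [] := by simp
      rw [List.flatMap_append, List.flatMap_append, List.flatMap_cons, List.flatMap_nil,
        pvChunkStr_toList _ htake]
      have hiff : ((w :: t).take 5).length = 5 ↔ 5 ≤ (w :: t).length := by
        rw [List.length_take]; omega
      by_cases h5 : 5 ≤ (w :: t).length
      · rw [if_pos (hiff.mpr h5)]
        conv_rhs => rw [pvSpecChars]
        rw [if_pos h5]
        simp [show ("\n" : String).toList = ['\n'] from rfl]
      · rw [if_neg (fun hh => h5 (hiff.mp hh))]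
        conv_rhs => rw [pvSpecChars]
        rw [if_neg h5]
        simp

-- ===== VERDICT (by name: the statement is the Claim_ definition above) =====
theorem sumpdf_spec : Claim_equal_sumpdf := by
  intro str _
  simp only [Spec_sumpdf, sumpdf, sumpdf_alt]
  rw [← String.toList_inj]
  rw [pvFoldA_toList, pvFlatMapA_eq_specChars, pvLoopB_toList]
  simp
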